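-- pv_equiv track=rewrite | github.com/GedionT/Competitive-programming | Camp-1 - Month long/camp_week_3/contest/sushi_for_two.py | sushi_valid
-- ===== SOURCE A (Python) =====
-- def sushi_valid(arr):
--
--     res = []
--     ans = 0
--
--     for i in range(len(arr)):
--         if len(res) == 0:
--             res.append(1)
--             continue
--         if arr[i] == arr[i-1]:
--             res[-1] += 1
--         else:
--             res.append(1)
--     for i in range(1, len(res)):
--         ans = max(ans, min(res[i], res[i-1]))
--
--     return ans * 2
-- ===== SOURCE B (Python) =====
-- def sushi_valid(arr):
--     prev_run = 0
--     cur_run = 0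
--     ans = 0
--     last = None
--     for x in arr:
--         if cur_run and x == last:
--             cur_run += 1
--         else:
--             ans = max(ans, min(prev_run, cur_run))
--             prev_run, cur_run = cur_run, 1
--         last = x
--     return max(ans, min(prev_run, cur_run)) * 2
-- ===== Notes on version B (the rewrite author's own statement) =====
-- stated objective: alternative
-- what changed: Single fused pass keeping only (prev_run, cur_run, ans) integers instead of building a run-length list and then re-scanning it for adjacent-pair minima.
import Mathlib
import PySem

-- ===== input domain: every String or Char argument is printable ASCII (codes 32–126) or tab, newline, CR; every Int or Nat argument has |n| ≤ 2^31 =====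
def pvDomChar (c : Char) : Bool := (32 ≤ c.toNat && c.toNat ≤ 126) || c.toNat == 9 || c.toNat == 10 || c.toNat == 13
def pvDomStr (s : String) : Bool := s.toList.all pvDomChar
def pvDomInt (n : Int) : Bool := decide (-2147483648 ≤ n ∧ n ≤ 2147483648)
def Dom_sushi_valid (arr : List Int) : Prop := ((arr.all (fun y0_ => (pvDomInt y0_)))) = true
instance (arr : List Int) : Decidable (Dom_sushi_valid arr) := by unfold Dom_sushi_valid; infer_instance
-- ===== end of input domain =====

-- B fuses A's two passes (build run-length list, then scan adjacent pairs) into one pass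
-- keeping only three integers (prev_run, cur_run, ans); no intermediate list (objective: alternative).

-- ===== PORT A =====
-- first loop: build run-length list res; second loop: max over min of adjacent runs
def sushi_valid (arr : List Int) : Int :=
  let res := (PySem.List.pyRange 0 (arr.length : Int) 1).foldl (fun res i =>
    if res.length = 0 then res ++ [(1 : Int)]
    else if (PySem.List.pyGet? arr i).getD 0 = (PySem.List.pyGet? arr (i - 1)).getD 0 then
      res.dropLast ++ [res.getLast! + 1]          -- res[-1] += 1
    else res ++ [(1 : Int)]) ([] : List Int)
  let ans := (PySem.List.pyRange 1 (res.length : Int) 1).foldl (fun ans i =>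
    max ans (min ((PySem.List.pyGet? res i).getD 0) ((PySem.List.pyGet? res (i - 1)).getD 0))) 0
  ans * 2

-- ===== PORT B =====
-- single pass, state (prev_run, cur_run, ans, last element seen)
def altGo (prev cur ans : Int) (last : Option Int) : List Int → Int
  | [] => max ans (min prev cur) * 2
  | x :: rest =>
    if cur ≠ 0 ∧ some x = last then altGo prev (cur + 1) ans (some x) rest
    else altGo cur 1 (max ans (min prev cur)) (some x) rest

def sushi_valid_alt (arr : List Int) : Int := altGo 0 0 0 none arr

-- ===== PRECONDITION & SPEC =====
def Spec_sushi_valid (arr : List Int) (out : Int) : Prop := out = sushi_valid_alt arr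
instance (arr : List Int) (out : Int) : Decidable (Spec_sushi_valid arr out) := by unfold Spec_sushi_valid; infer_instance

-- ===== CLAIM (what is proved, stated in full; the proofs are below) =====
def Claim_equal_sushi_valid : Prop := ∀ (arr : List Int), Dom_sushi_valid arr → Spec_sushi_valid arr (sushi_valid arr)

-- ===== LEMMAS AND PROOFS =====

-- run-length encoding of a run of value l with count cnt so far, followed by the given list
def rleGo (l cnt : Int) : List Int → List Int
  | [] => [cnt]
  | x :: xs => if x = l then rleGo l (cnt + 1) xs else cnt :: rleGo x 1 xs

def rleOf : List Int → List Int
  | [] => []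
  | x :: xs => rleGo x 1 xs

-- the adjacent-pair scan: prev is the previous run length
def tailAns (ans prev : Int) : List Int → Int
  | [] => ans
  | y :: ys => tailAns (max ans (min y prev)) y ys

def pairAns : List Int → Int
  | [] => 0
  | r :: rs => tailAns 0 r rs

lemma rleGo_ne_nil (xs : List Int) : ∀ l c, rleGo l c xs ≠ [] := by
  induction xs with
  | nil => intro l c; simp [rleGo]
  | cons x xs ih => intro l c; simp only [rleGo]; split <;> simp [ih]

lemma rleGo_snoc (ys : List Int) : ∀ l c x, rleGo l c (ys ++ [x]) =
    if x = (l :: ys).getLast! then (rleGo l c ys).dropLast ++ [(rleGo l c ys).getLast! + 1]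
    else rleGo l c ys ++ [1] := by
  induction ys with
  | nil =>
    intro l c x
    by_cases h : x = l <;> simp [rleGo, h]
  | cons y ys ih =>
    intro l c x
    simp only [List.cons_append, rleGo]
    by_cases hy : y = l
    · subst hy
      rw [ih, show (y :: y :: ys).getLast! = (y :: ys).getLast! by simp [List.getLast?_cons_cons]]
      simp
    · simp only [if_neg hy]
      rw [ih, show (l :: y :: ys).getLast! = (y :: ys).getLast! by simp [List.getLast?_cons_cons]]
      have hne := rleGo_ne_nil ys y 1
      split
      · rw [show (c :: rleGo y 1 ys).getLast! = (rleGo y 1 ys).getLast! by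
          cases h : rleGo y 1 ys with
          | nil => exact absurd h hne
          | cons u us => simp [List.getLast?_cons_cons]]
        simp [List.dropLast_cons_of_ne_nil hne]
      · simp

-- getLast! of a nonempty prefix is the element before index n
lemma take_getLast (arr : List Int) (n : Nat) (h1 : 1 ≤ n) (h2 : n ≤ arr.length) :
    (arr.take n).getLast! = arr[n - 1]'(by omega) := by
  have hlen : (arr.take n).length = n := by simp; omega
  have h3 : n - 1 < n := by omega
  simp only [List.getLast!_eq_getLast?_getD, List.getLast?_eq_getElem?, hlen,
    List.getElem?_take, if_pos h3]
  rw [List.getElem?_eq_getElem (by omega)]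
  rfl

-- PHASE 1: A's first loop computes the run-length encoding of the prefix
lemma phase1 (arr : List Int) (n : Nat) (hn : n ≤ arr.length) :
    (PySem.List.pyRange 0 (n : Int) 1).foldl (fun res i =>
      if res.length = 0 then res ++ [(1 : Int)]
      else if (PySem.List.pyGet? arr i).getD 0 = (PySem.List.pyGet? arr (i - 1)).getD 0 then
        res.dropLast ++ [res.getLast! + 1]
      else res ++ [(1 : Int)]) ([] : List Int) = rleOf (arr.take n) := by
  induction n with
  | zero => simp [PySem.List.pyRange_one_eq_nil, rleOf]
  | succ n ih =>
    have hn' : n ≤ arr.length := by omega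
    have hlt : n < arr.length := by omega
    have hcast : ((n + 1 : Nat) : Int) = (n : Int) + 1 := by push_cast; ring
    rw [hcast, PySem.List.pyRange_one_succ_right (by positivity), List.foldl_append, ih hn']
    simp only [List.foldl_cons, List.foldl_nil]
    have htake : arr.take (n + 1) = arr.take n ++ [arr[n]'hlt] := by
      rw [List.take_add_one, List.getElem?_eq_getElem hlt]; rfl
    by_cases h0 : n = 0
    · subst h0
      simp [rleOf, htake, rleGo]
    · have hne : arr.take n ≠ [] := by
        have hl : (arr.take n).length = n := by simp; omega
        intro hc
        rw [hc] at hl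
        simp at hl
        omega
      obtain ⟨a, ys, hys⟩ : ∃ a ys, arr.take n = a :: ys := List.exists_cons_of_ne_nil hne
      have hget1 : (PySem.List.pyGet? arr (n : Int)).getD 0 = arr[n]'hlt := by
        rw [PySem.List.pyGet?_natCast, List.getElem?_eq_getElem hlt]; rfl
      have hcast2 : ((n : Int) - 1) = ((n - 1 : Nat) : Int) := by omega
      have hget2 : (PySem.List.pyGet? arr ((n : Int) - 1)).getD 0 = arr[n - 1]'(by omega) := by
        rw [hcast2, PySem.List.pyGet?_natCast, List.getElem?_eq_getElem (by omega)]; rfl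
      have hlast : (a :: ys).getLast! = arr[n - 1]'(by omega) := by
        rw [← hys]; exact take_getLast arr n (by omega) hn'
      rw [htake, hys]
      simp only [rleOf, List.cons_append]
      rw [rleGo_snoc ys a 1 (arr[n]'hlt), hlast, hget1, hget2]
      have hres_ne : rleGo a 1 ys ≠ [] := rleGo_ne_nil ys a 1
      rw [if_neg (by simpa [List.length_eq_zero_iff] using hres_ne)]

-- PHASE 2: A's second loop is the adjacent-pair scan
lemma phase2go (res : List Int) (m : Nat) : ∀ (k : Nat) (ans : Int) (hk1 : 1 ≤ k)
    (hk2 : k ≤ res.length) (_hm : m = res.length - k),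
    (PySem.List.pyRange (k : Int) (res.length : Int) 1).foldl (fun ans i =>
      max ans (min ((PySem.List.pyGet? res i).getD 0) ((PySem.List.pyGet? res (i - 1)).getD 0))) ans
    = tailAns ans (res[k - 1]'(by omega)) (res.drop k) := by
  induction m with
  | zero =>
    intro k ans hk1 hk2 hm2
    have hk : k = res.length := by omega
    subst hk
    rw [PySem.List.pyRange_one_eq_nil (le_refl _)]
    simp [tailAns, List.drop_length]
  | succ m ih =>
    intro k ans hk1 hk2 hm2
    have hklt : k < res.length := by omega
    rw [PySem.List.pyRange_one_cons (by exact_mod_cast hklt)]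
    simp only [List.foldl_cons]
    have hg1 : (PySem.List.pyGet? res (k : Int)).getD 0 = res[k]'hklt := by
      rw [PySem.List.pyGet?_natCast, List.getElem?_eq_getElem hklt]; rfl
    have hcast2 : ((k : Int) - 1) = ((k - 1 : Nat) : Int) := by omega
    have hg2 : (PySem.List.pyGet? res ((k : Int) - 1)).getD 0 = res[k - 1]'(by omega) := by
      rw [hcast2, PySem.List.pyGet?_natCast, List.getElem?_eq_getElem (by omega)]; rfl
    rw [hg1, hg2]
    have hcast3 : (k : Int) + 1 = ((k + 1 : Nat) : Int) := by push_cast; ring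
    rw [hcast3, ih (k + 1) _ (by omega) (by omega) (by omega)]
    rw [List.drop_eq_getElem_cons hklt]
    simp [tailAns]

lemma phase2 (res : List Int) :
    (PySem.List.pyRange 1 (res.length : Int) 1).foldl (fun ans i =>
      max ans (min ((PySem.List.pyGet? res i).getD 0) ((PySem.List.pyGet? res (i - 1)).getD 0))) 0
    = pairAns res := by
  cases res with
  | nil => simp [PySem.List.pyRange_one_eq_nil, pairAns]
  | cons r rs =>
    have h := phase2go (r :: rs) rs.length 1 0 (by omega) (by simp) (by simp)
    simpa [pairAns] using h

-- A equals the common characterization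
lemma sushi_A (arr : List Int) : sushi_valid arr = pairAns (rleOf arr) * 2 := by
  simp only [sushi_valid]
  rw [phase1 arr arr.length (le_refl _), List.take_length, phase2]

-- B-side: altGo with a live run equals the scan over the remaining run-length encoding
lemma altGo_eq (rest : List Int) : ∀ prev cur ans l, 1 ≤ cur →
    altGo prev cur ans (some l) rest = tailAns ans prev (rleGo l cur rest) * 2 := by
  induction rest with
  | nil =>
    intro prev cur ans l _
    simp [altGo, rleGo, tailAns, min_comm prev cur]
  | cons x xs ih =>
    intro prev cur ans l hc
    simp only [altGo, rleGo]
    by_cases hx : x = l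
    · subst hx
      rw [if_pos ⟨by omega, rfl⟩, if_pos rfl]
      exact ih prev (cur + 1) ans x (by omega)
    · rw [if_neg (by simp [hx]), if_neg hx, ih cur 1 _ x (le_refl _)]
      simp [tailAns, min_comm prev cur]

lemma sushi_B (arr : List Int) : sushi_valid_alt arr = pairAns (rleOf arr) * 2 := by
  cases arr with
  | nil => simp [sushi_valid_alt, altGo, rleOf, pairAns]
  | cons x xs =>
    unfold sushi_valid_alt
    rw [show altGo 0 0 0 none (x :: xs)
        = altGo 0 1 (max 0 (min 0 0)) (some x) xs by simp [altGo]]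
    rw [altGo_eq xs 0 1 (max 0 (min 0 0)) x (le_refl _),
      show max (0 : Int) (min 0 0) = 0 by simp]
    obtain ⟨r, rs, hr⟩ : ∃ r rs, rleGo x 1 xs = r :: rs := by
      cases h : rleGo x 1 xs with
      | nil => exact absurd h (rleGo_ne_nil xs x 1)
      | cons r rs => exact ⟨r, rs, rfl⟩
    rw [show rleOf (x :: xs) = rleGo x 1 xs from rfl, hr]
    simp only [pairAns, tailAns]
    rw [show max (0 : Int) (min r 0) = 0 by omega]

-- ===== VERDICT (by name: the statement is the Claim_ definition above) =====
theorem sushi_valid_spec : Claim_equal_sushi_valid := by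
  intro arr _
  unfold Spec_sushi_valid
  rw [sushi_A, sushi_B]
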